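-- pv_equiv track=rewrite | github.com/imewei/xpcs-toolkit | xpcs_toolkit/tests/integration/test_documentation.py | _parse_documented_parameters
-- ===== SOURCE A (Python) =====
-- def _parse_documented_parameters(param_section: str) -> list[str]:
--     """Parse parameter names from the Parameters section."""
--     param_names = []
--     for line in param_section.split("\n"):
--         line = line.strip()
--         if " : " in line:
--             param_name = line.split(" : ")[0].strip()
--             param_names.append(param_name)
--     return param_names
-- ===== SOURCE B (Python) =====
-- import re
--
-- # One MULTILINE regex scan over the whole section instead of a per-line loop:
-- # per line, skip leading horizontal whitespace, capture from the first
-- # non-space character non-greedily up to the first " : ", strip the name.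
-- _PARAM_RE = re.compile(r"^[^\S\n]*(\S.*?) : ", re.MULTILINE)
--
--
-- def _parse_documented_parameters(param_section: str) -> list[str]:
--     """Parse parameter names from the Parameters section."""
--     return [m.group(1).strip() for m in _PARAM_RE.finditer(param_section)]
-- ===== Notes on version B (the rewrite author's own statement) =====
-- stated objective: idiomatic
-- what changed: Replaces A's per-line strip/membership-test/split loop with a single precompiled MULTILINE regex scan (re.finditer) over the whole section: per line it skips leading horizontal whitespace, captures non-greedily up to the first ' : ', and strips each capture.
-- intended difference: On sections containing a line whose ' : ' delimiter is followed only by whitespace (e.g. 'name : ' with the type omitted), A returns a list missing that name because it strips the line before testing for ' : ', while B includes the stripped name; B's is intended since the parameter is documented on that line. — e.g. on _parse_documented_parameters("a : "): A returns [], B returns ["a"]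
import Mathlib
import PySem

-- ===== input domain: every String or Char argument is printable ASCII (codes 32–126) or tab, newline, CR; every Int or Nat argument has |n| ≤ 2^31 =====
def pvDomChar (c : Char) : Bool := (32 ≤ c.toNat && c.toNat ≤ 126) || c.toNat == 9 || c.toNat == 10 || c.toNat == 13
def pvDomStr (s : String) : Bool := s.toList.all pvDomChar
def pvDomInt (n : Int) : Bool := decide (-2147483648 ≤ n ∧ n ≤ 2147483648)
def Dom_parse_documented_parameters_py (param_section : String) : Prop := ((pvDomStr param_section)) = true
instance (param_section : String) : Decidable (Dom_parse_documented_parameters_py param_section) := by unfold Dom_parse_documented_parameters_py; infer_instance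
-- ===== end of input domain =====

-- B replaces A's per-line strip/test/split loop by a single MULTILINE regex scan
-- over the whole section (objective: idiomatic); on lines whose " : " is followed
-- only by whitespace the two differ (stated in D_ below), everywhere else they agree.

-- ===== PORT A =====
-- literal port of A; line.split(" : ")[0] is `.headD ""` (str.split never returns an empty list, so [0] never raises)
def parse_documented_parameters_py (param_section : String) : List String :=
  ((PySem.Str.split? param_section "\n").getD []).foldl
    (fun param_names line0 =>
      let line := PySem.Str.strip line0
      if PySem.Str.isIn " : " line then
        param_names ++ [PySem.Str.strip (((PySem.Str.split? line " : ").getD []).headD "")]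
      else param_names) []

-- ===== PORT B =====
-- Hand port of B's compiled regex r"^[^\S\n]*(\S.*?) : " with re.MULTILINE, exact on
-- Dom (there the regex classes `\s`/`\S` and str.strip whitespace coincide: space/
-- tab/CR): the pattern is ^-anchored and none of its atoms can match '\n', so
-- finditer tries it exactly once per '\n'-separated line; on a line it skips leading
-- horizontal whitespace ([^\S\n]*), requires a non-space char (\S), then scans
-- non-greedily (.*?) for the first " : ", returning the capture group; the
-- comprehension strips each group.
def pvSep : List Char := " : ".toList

def pvCond (suf : List Char) : Bool := PySem.Chars.startswith suf pvSep

def pvScan (pre : List Char) : List Char → Option (List Char)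
  | [] => if pvCond [] then some pre else none
  | c :: rest => if pvCond (c :: rest) then some pre else pvScan (pre ++ [c]) rest

def pvMatchLine (line : List Char) : Option (List Char) :=
  match line.dropWhile PySem.Chars.isspace with
  | [] => none
  | c :: rest => pvScan [c] rest

def parse_documented_parameters_py_alt (param_section : String) : List String :=
  ((PySem.Chars.splitOn param_section.toList "\n".toList).filterMap pvMatchLine).map
    (fun g => String.ofList (PySem.Chars.strip g))

-- ===== PRECONDITION & SPEC =====
-- On sections containing a line whose " : " delimiter is followed only by whitespace
-- (e.g. "name : " with the type omitted), A drops that name because it strips the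
-- line before testing for " : ", while B includes the stripped name; B's is intended
-- since the parameter is documented on that line.
-- D_ is one left-to-right scan of the text: per '\n'-line, it fires exactly when the
-- first " : " preceded by a non-whitespace character is followed only by whitespace.
def pvWs (c : Char) : Bool :=
  if 32 < c.toNat && c.toNat < 133 then false else
  have n := c.toNat
  decide (n = 32) || decide (9 ≤ n) && decide (n ≤ 13) || decide (28 ≤ n) && decide (n ≤ 31) || decide (n = 133) ||
                  decide (n = 160) ||
                decide (n = 5760) ||
              decide (8192 ≤ n) && decide (n ≤ 8202) ||
            decide (n = 8232) ||
          decide (n = 8233) ||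
        decide (n = 8239) ||
      decide (n = 8287) ||
    decide (n = 12288)

def pvOcc3 (L : List Char) : Bool := ([' ', ':', ' '] : List Char).isPrefixOf L

-- modes: 0 scan (seen = a non-whitespace char occurred on this line); 3/4 consume the
-- ':' and trailing ' ' of a hit; 1 check that the rest of the line is whitespace
-- (end of line/text = the region holds); 2 skip to the end of a failed line
def pvM : Nat → Bool → List Char → Bool
  | m, _, [] => m == 1
  | m, seen, c :: r =>
    if m == 1 then
      if c = '\n' then true
      else if pvWs c then pvM 1 seen r
      else pvM 2 seen r
    else if m == 2 then
      if c = '\n' then pvM 0 false r else pvM 2 seen r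
    else if m == 3 then pvM 4 seen r
    else if m == 4 then pvM 1 seen r
    else if c = '\n' then pvM 0 false r
    else if seen && pvOcc3 (c :: r) then pvM 3 seen r
    else pvM 0 (seen || !pvWs c) r

def D_parse_documented_parameters_py (param_section : String) : Prop :=
  pvM 0 false param_section.toList = true
instance (param_section : String) : Decidable (D_parse_documented_parameters_py param_section) := by unfold D_parse_documented_parameters_py; infer_instance

def Spec_parse_documented_parameters_py (param_section : String) (out : List String) : Prop := ¬ D_parse_documented_parameters_py param_section → out = parse_documented_parameters_py_alt param_section
instance (param_section : String) (out : List String) : Decidable (Spec_parse_documented_parameters_py param_section out) := by unfold Spec_parse_documented_parameters_py; infer_instance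

def pvDiffWitness_parse_documented_parameters_py : String := "a : "
def pvDiffWitnessOut_parse_documented_parameters_py : (List String) × (List String) := ([], ["a"])

-- ===== CLAIM (what is proved, stated in full; the proofs are below) =====
def Claim_unchanged_parse_documented_parameters_py : Prop := ∀ (param_section : String), Dom_parse_documented_parameters_py param_section → Spec_parse_documented_parameters_py param_section (parse_documented_parameters_py param_section)
def Claim_changed_parse_documented_parameters_py : Prop := Dom_parse_documented_parameters_py (pvDiffWitness_parse_documented_parameters_py) ∧ D_parse_documented_parameters_py (pvDiffWitness_parse_documented_parameters_py) ∧ parse_documented_parameters_py (pvDiffWitness_parse_documented_parameters_py) = pvDiffWitnessOut_parse_documented_parameters_py.1 ∧ parse_documented_parameters_py_alt (pvDiffWitness_parse_documented_parameters_py) = pvDiffWitnessOut_parse_documented_parameters_py.2 ∧ pvDiffWitnessOut_parse_documented_parameters_py.1 ≠ pvDiffWitnessOut_parse_documented_parameters_py.2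

def Claim_exact_parse_documented_parameters_py : Prop := ∀ (param_section : String), Dom_parse_documented_parameters_py param_section → D_parse_documented_parameters_py param_section → parse_documented_parameters_py param_section ≠ parse_documented_parameters_py_alt param_section

-- ===== LEMMAS AND PROOFS =====

-- proof-side abbreviation: A's strip-then-test succeeds minus B's raw-scan test
def pvLineBad (line : List Char) : Bool :=
  PySem.Chars.isIn " : ".toList ((line.dropWhile PySem.Chars.isspace).drop 1) &&
  !PySem.Chars.isIn " : ".toList (PySem.Chars.strip line)

-- proof-side restatements of pvM: per-line scan and newline split
def pvAllWs : List Char → Bool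
  | [] => true
  | c :: r => pvWs c && pvAllWs r

def pvFindBad (seen : Bool) : List Char → Bool
  | [] => false
  | c :: r => if seen && pvOcc3 (c :: r) then pvAllWs (r.drop 2) else pvFindBad (seen || !pvWs c) r

def pvSplitNL : List Char → List (List Char)
  | [] => [[]]
  | c :: r => if c = '\n' then [] :: pvSplitNL r else List.modifyHead (fun x => c :: x) (pvSplitNL r)

lemma pvSep_def : " : ".toList = pvSep := rfl

lemma pvWs_eq : pvWs = PySem.Chars.isspace := by
  funext c
  unfold pvWs
  by_cases h : (32 < c.toNat && c.toNat < 133) = true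
  · rw [if_pos h]
    have hn : 32 < c.toNat ∧ c.toNat < 133 := by simpa using h
    symm
    simp only [PySem.Chars.isspace, Bool.or_eq_false_iff, Bool.and_eq_false_iff,
      decide_eq_false_iff_not]
    omega
  · rw [if_neg h]
    rfl

lemma pvGoNL : ∀ (fuel : Nat) (l cur : List Char) (acc : List (List Char)), l.length < fuel →
    PySem.Chars.splitOn.go ['\n'] fuel l cur acc =
      acc.reverse ++ List.modifyHead (fun x => cur.reverse ++ x) (pvSplitNL l) := by
  intro fuel
  induction fuel with
  | zero => intro l cur acc h; omega
  | succ n ih =>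
    intro l cur acc h
    match l with
    | [] => simp [PySem.Chars.splitOn.go, pvSplitNL]
    | c :: rest =>
      rw [PySem.Chars.splitOn.go]
      by_cases hp : (['\n'] : List Char).isPrefixOf (c :: rest)
      · have hc : c = '\n' := by
          have h1 := List.isPrefixOf_iff_prefix.mp hp
          obtain ⟨r, hr⟩ := h1
          exact (List.cons.injEq _ _ _ _ ▸ hr).1.symm
        simp only [hp, if_true]
        rw [show (['\n'] : List Char).length = 1 from rfl, List.drop_succ_cons, List.drop_zero]
        rw [ih rest [] (cur.reverse :: acc) (by simp at h; omega)]
        rw [pvSplitNL]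
        simp only [hc, if_true]
        cases pvSplitNL rest with
        | nil => simp
        | cons hd tl => simp
      · have hc : ¬ c = '\n' := by
          intro h'
          exact hp (by simp [h'])
        simp only [hp, Bool.false_eq_true, if_false]
        rw [ih rest (c :: cur) acc (by simp at h; omega)]
        rw [pvSplitNL]
        simp only [hc, if_false]
        cases pvSplitNL rest with
        | nil => simp
        | cons hd tl => simp

lemma pvSplitNL_eq (L : List Char) : PySem.Chars.splitOn L ['\n'] = pvSplitNL L := by
  rw [PySem.Chars.splitOn, pvGoNL (L.length + 1) L [] [] (by omega)]
  cases pvSplitNL L with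
  | nil => simp
  | cons hd tl => simp

-- A's per-line test and extraction, named so that `PySem.List.foldl_append_if` applies
def pvPa (line0 : String) : Bool := PySem.Str.isIn " : " (PySem.Str.strip line0)

def pvFa (line0 : String) : String :=
  PySem.Str.strip (((PySem.Str.split? (PySem.Str.strip line0) " : ").getD []).headD "")

set_option maxHeartbeats 1000000 in
lemma pvA_eq (s : String) : parse_documented_parameters_py s =
    [] ++ List.map pvFa (List.filter pvPa ((PySem.Str.split? s "\n").getD [])) :=
  PySem.List.foldl_append_if pvPa pvFa _ []

-- head of str.split(sep): everything before the first occurrence of sep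
def pvHeadSplit (sep : List Char) : List Char → List Char
  | [] => []
  | c :: rest => if sep.isPrefixOf (c :: rest) then [] else c :: pvHeadSplit sep rest

lemma pvGoHead (sep : List Char) (hsep : sep ≠ []) : ∀ (fuel : Nat) (l cur : List Char) (acc : List (List Char)),
    l.length < fuel →
    ∃ tail, PySem.Chars.splitOn.go sep fuel l cur acc =
      acc.reverse ++ (cur.reverse ++ pvHeadSplit sep l) :: tail := by
  have hs : 1 ≤ sep.length := by
    cases sep with | nil => exact absurd rfl hsep | cons a b => simp
  intro fuel
  induction fuel with
  | zero => intro l cur acc h; omega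
  | succ n ih =>
    intro l cur acc h
    match l with
    | [] =>
      exact ⟨[], by simp [PySem.Chars.splitOn.go, pvHeadSplit]⟩
    | c :: rest =>
      rw [PySem.Chars.splitOn.go]
      by_cases hp : sep.isPrefixOf (c :: rest)
      · simp only [hp, if_true]
        have hlen : (List.drop sep.length (c :: rest)).length < n := by
          simp at h ⊢; omega
        obtain ⟨tail, ht⟩ := ih (List.drop sep.length (c :: rest)) [] (cur.reverse :: acc) hlen
        refine ⟨pvHeadSplit sep (List.drop sep.length (c :: rest)) :: tail, ?_⟩
        rw [ht]
        simp [pvHeadSplit, hp]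
      · simp only [hp]
        have hlen : rest.length < n := by simp at h; omega
        obtain ⟨tail, ht⟩ := ih rest (c :: cur) acc hlen
        refine ⟨tail, ?_⟩
        rw [ht]
        simp [pvHeadSplit, hp]

lemma pvSplitOnHead (sep t : List Char) (hsep : sep ≠ []) :
    (PySem.Chars.splitOn t sep).headD [] = pvHeadSplit sep t := by
  obtain ⟨tail, h⟩ := pvGoHead sep hsep (t.length + 1) t [] [] (by omega)
  simp [PySem.Chars.splitOn, h]

lemma pvHeadSplit_of_min (sep t : List Char) (j : Nat) (hj : sep <+: t.drop j)
    (hmin : ∀ i < j, ¬ sep <+: t.drop i) : pvHeadSplit sep t = t.take j := by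
  induction t generalizing j with
  | nil =>
    simp [pvHeadSplit]
  | cons c rest ih =>
    rw [pvHeadSplit]
    cases j with
    | zero =>
      simp only [List.drop_zero] at hj
      rw [if_pos (by simpa [List.isPrefixOf_iff_prefix] using hj), List.take_zero]
    | succ k =>
      rw [if_neg ?_, List.take_succ_cons]
      · congr 1
        exact ih k (by simpa using hj) (fun i hi => by simpa using hmin (i + 1) (by omega))
      · have := hmin 0 (by omega)
        simpa [List.isPrefixOf_iff_prefix] using this

-- index of the first position of suf where pvCond holds
def pvFirst : List Char → Option Nat
  | [] => if pvCond [] then some 0 else none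
  | c :: rest => if pvCond (c :: rest) then some 0 else (pvFirst rest).map (· + 1)

lemma pvScan_eq (suf : List Char) : ∀ pre,
    pvScan pre suf = (pvFirst suf).map (fun k => pre ++ suf.take k) := by
  induction suf with
  | nil =>
    intro pre
    rw [pvScan, pvFirst]
    by_cases h : pvCond []
    · simp [h]
    · simp [h]
  | cons c rest ih =>
    intro pre
    rw [pvScan, pvFirst]
    by_cases h : pvCond (c :: rest)
    · simp [h]
    · simp only [h, if_false, Bool.false_eq_true]
      rw [ih (pre ++ [c])]
      cases hf : pvFirst rest with
      | none => simp
      | some k => simp [List.take_succ_cons]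

lemma pvCond_iff (suf : List Char) : pvCond suf = true ↔ pvSep <+: suf := by
  rw [pvCond, PySem.Chars.startswith_iff]

lemma pvFirst_none (suf : List Char) (h : pvFirst suf = none) :
    ∀ k, pvCond (suf.drop k) = false := by
  induction suf with
  | nil =>
    intro k
    rw [pvFirst] at h
    by_cases hc : pvCond [] <;> simp_all
  | cons c rest ih =>
    intro k
    rw [pvFirst] at h
    by_cases hc : pvCond (c :: rest)
    · simp [hc] at h
    · simp only [hc, if_false, Bool.false_eq_true, Option.map_eq_none_iff] at h
      cases k with
      | zero => simpa using hc
      | succ m => simpa using ih h m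

lemma pvFirst_some (suf : List Char) (k : Nat) (h : pvFirst suf = some k) :
    pvCond (suf.drop k) = true ∧ ∀ i < k, pvCond (suf.drop i) = false := by
  induction suf generalizing k with
  | nil =>
    rw [pvFirst] at h
    by_cases hc : pvCond []
    · simp only [hc, if_true, Option.some.injEq] at h
      subst h
      exact ⟨by simpa using hc, fun i hi => by omega⟩
    · simp [hc] at h
  | cons c rest ih =>
    rw [pvFirst] at h
    by_cases hc : pvCond (c :: rest)
    · simp only [hc, if_true, Option.some.injEq] at h
      subst h
      exact ⟨by simpa using hc, fun i hi => by omega⟩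
    · simp only [hc, if_false, Bool.false_eq_true, Option.map_eq_some_iff] at h
      obtain ⟨m, hm, rfl⟩ := h
      obtain ⟨h1, h2⟩ := ih m hm
      refine ⟨by simpa using h1, fun i hi => ?_⟩
      cases i with
      | zero => simpa using hc
      | succ n => simpa using h2 n (by omega)

-- occurrence translation between the raw line u = t ++ w (t the rstripped part,
-- w the trailing whitespace) and the stripped part t
lemma pvOccIn (t w : List Char) (j : Nat) (hj : pvSep <+: t.drop j) :
    pvSep <+: (t ++ w).drop j := by
  have h3 : j + 3 ≤ t.length := by
    have := hj.length_le
    rw [show pvSep.length = 3 from by decide, List.length_drop] at this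
    omega
  rw [List.drop_append_of_le_length (by omega)]
  exact hj.trans (List.prefix_append _ _)

lemma pvOccOut (t w : List Char) (j : Nat) (h3 : j + 3 ≤ t.length)
    (hj : pvSep <+: (t ++ w).drop j) : pvSep <+: t.drop j := by
  rw [List.drop_append_of_le_length (by omega)] at hj
  rw [List.prefix_iff_eq_take, show pvSep.length = 3 from by decide] at hj ⊢
  rw [List.take_append_of_le_length (by rw [List.length_drop]; omega)] at hj
  exact hj

lemma pvOccColon (t w : List Char) (hw : ∀ c ∈ w, PySem.Chars.isspace c = true)
    (j : Nat) (hj : pvSep <+: (t ++ w).drop j) : j + 2 ≤ t.length := by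
  obtain ⟨r, hr⟩ := hj
  have hget : (t ++ w)[j + 1]? = some ':' := by
    have h1 : ((t ++ w).drop j)[1]? = some ':' := by
      rw [← hr]
      rfl
    rw [List.getElem?_drop] at h1
    exact h1
  by_contra hc
  have hjw : j + 1 - t.length < w.length := by
    have := List.getElem?_eq_some_iff.mp hget
    obtain ⟨hlen, _⟩ := this
    rw [List.length_append] at hlen
    omega
  rw [List.getElem?_append_right (by omega)] at hget
  have hmem : ':' ∈ w := by
    have := List.getElem?_eq_some_iff.mp hget
    obtain ⟨hlen, hv⟩ := this
    rw [← hv]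
    exact List.getElem_mem _
  have := hw ':' hmem
  simp [PySem.Chars.isspace] at this

lemma pvAllWs_all (M : List Char) : pvAllWs M = M.all pvWs := by
  induction M with
  | nil => rfl
  | cons c r ih => simp [pvAllWs, ih]

lemma pvOcc3_cons (r : List Char) : pvOcc3 (' ' :: ':' :: ' ' :: r) = true := rfl

lemma pvScanBad (L : List Char) : ∀ (seen : Bool) (i : Nat),
    pvSep <+: L.drop i →
    (seen = true ∨ pvAllWs (L.take i) = false) →
    pvAllWs (L.drop (i + 3)) = true →
    (∀ i' < i, pvSep <+: L.drop i' → ¬ (seen = true ∨ pvAllWs (L.take i') = false)) →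
    pvFindBad seen L = true := by
  induction L with
  | nil =>
    intro seen i h1 _ _ _
    rw [List.drop_nil] at h1
    exact absurd (List.prefix_nil.mp h1) (by decide)
  | cons c R ih =>
    intro seen i h1 h2 h3 h4
    cases i with
    | zero =>
      have hseen : seen = true := by
        rcases h2 with h2 | h2
        · exact h2
        · simp [pvAllWs] at h2
      obtain ⟨r, hr⟩ := h1
      rw [List.drop_zero] at hr
      have he : c :: R = ' ' :: ':' :: ' ' :: r := by rw [← hr]; rfl
      injection he with h5 h6
      subst hseen h5 h6
      simpa [pvFindBad, pvOcc3_cons] using h3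
    | succ i0 =>
      have hb : (seen && pvOcc3 (c :: R)) = false := by
        by_cases hs : seen = true
        · by_cases ho : pvOcc3 (c :: R) = true
          · exact absurd (Or.inl hs) (h4 0 (by omega) (by
              rw [List.drop_zero]
              exact List.isPrefixOf_iff_prefix.mp (by rwa [pvOcc3] at ho)))
          · rw [Bool.and_eq_false_iff]; right; simpa using ho
        · rw [Bool.and_eq_false_iff]; left; simpa using hs
      have hstep : pvFindBad seen (c :: R) = pvFindBad (seen || !pvWs c) R := by
        simp only [pvFindBad, hb, Bool.false_eq_true, if_false]
      rw [hstep]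
      apply ih (seen || !pvWs c) i0
      · simpa using h1
      · rcases h2 with h2 | h2
        · left; simp [h2]
        · rw [List.take_succ_cons] at h2
          simp only [pvAllWs, Bool.and_eq_false_iff] at h2
          rcases h2 with h2 | h2
          · left; simp [h2]
          · right; exact h2
      · rw [show i0 + 1 + 3 = (i0 + 3) + 1 from by omega, List.drop_succ_cons] at h3
        exact h3
      · intro i' hi' hpf hdisj
        refine absurd ?_ (h4 (i' + 1) (by omega) (by simpa using hpf))
        rcases hdisj with hd | hd
        · rcases (by simpa using hd : seen = true ∨ pvWs c = false) with h | h
          · exact Or.inl h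
          · right
            rw [List.take_succ_cons]
            simp [pvAllWs, h]
        · right
          rw [List.take_succ_cons]
          simp [pvAllWs, hd]

lemma pvSplitNL_single (L : List Char) (h : '\n' ∉ L) : pvSplitNL L = [L] := by
  induction L with
  | nil => rfl
  | cons c r ih =>
    rw [pvSplitNL, if_neg (fun h0 => h (by simp [h0])),
      ih (fun hm => h (List.mem_cons_of_mem _ hm))]
    rfl

lemma pvSplitNL_cons_nl (l1 l2 : List Char) (h : '\n' ∉ l1) :
    pvSplitNL (l1 ++ '\n' :: l2) = l1 :: pvSplitNL l2 := by
  induction l1 with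
  | nil => simp [pvSplitNL]
  | cons c r ih =>
    rw [List.cons_append, pvSplitNL, if_neg (fun h0 => h (by simp [h0])),
      ih (fun hm => h (List.mem_cons_of_mem _ hm))]
    rfl

lemma pvOcc3_boundary (c : Char) (l rest : List Char) :
    pvOcc3 (c :: (l ++ '\n' :: rest)) = pvOcc3 (c :: l) := by
  match l with
  | [] =>
    simp [pvOcc3, List.isPrefixOf, show ((':' == '\n') : Bool) = false from rfl]
  | [d] =>
    simp [pvOcc3, List.isPrefixOf, show ((' ' == '\n') : Bool) = false from rfl]
  | d :: e :: f =>
    simp [pvOcc3, List.isPrefixOf]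

lemma pvOcc3_shape (c : Char) (l : List Char) (h : pvOcc3 (c :: l) = true) :
    ∃ l2, c = ' ' ∧ l = ':' :: ' ' :: l2 := by
  rw [pvOcc3] at h
  obtain ⟨r, hr0⟩ := List.isPrefixOf_iff_prefix.mp h
  have hr : ' ' :: ':' :: ' ' :: r = c :: l := hr0
  injection hr with h1 h2
  exact ⟨r, h1.symm, h2.symm⟩

lemma pvM1_cons (seen : Bool) (c : Char) (r : List Char) :
    pvM 1 seen (c :: r) =
      if c = '\n' then true else if pvWs c then pvM 1 seen r else pvM 2 seen r := rfl

lemma pvM2_cons (seen : Bool) (c : Char) (r : List Char) :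
    pvM 2 seen (c :: r) = if c = '\n' then pvM 0 false r else pvM 2 seen r := rfl

lemma pvM0_cons (seen : Bool) (c : Char) (r : List Char) :
    pvM 0 seen (c :: r) =
      if c = '\n' then pvM 0 false r
      else if seen && pvOcc3 (c :: r) then pvM 3 seen r
      else pvM 0 (seen || !pvWs c) r := rfl

lemma pvM2_split (rest : List Char) (r : List Char) : ∀ (seen : Bool), '\n' ∉ r →
    pvM 2 seen (r ++ '\n' :: rest) = pvM 0 false rest := by
  induction r with
  | nil =>
    intro seen _
    rw [List.nil_append, pvM2_cons, if_pos rfl]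
  | cons c r ih =>
    intro seen h
    rw [List.cons_append, pvM2_cons, if_neg (fun h0 => h (by simp [h0]))]
    exact ih seen (fun hm => h (List.mem_cons_of_mem _ hm))

lemma pvM2_end (r : List Char) : ∀ (seen : Bool), '\n' ∉ r → pvM 2 seen r = false := by
  induction r with
  | nil => intro _ _; rfl
  | cons c r ih =>
    intro seen h
    rw [pvM2_cons, if_neg (fun h0 => h (by simp [h0]))]
    exact ih seen (fun hm => h (List.mem_cons_of_mem _ hm))

lemma pvM1_split (rest : List Char) (r : List Char) : ∀ (seen : Bool), '\n' ∉ r →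
    pvM 1 seen (r ++ '\n' :: rest) = (pvAllWs r || pvM 0 false rest) := by
  induction r with
  | nil =>
    intro seen _
    rw [List.nil_append, pvM1_cons, if_pos rfl]
    simp [pvAllWs]
  | cons c r ih =>
    intro seen h
    rw [List.cons_append, pvM1_cons, if_neg (fun h0 => h (by simp [h0]))]
    by_cases hw : pvWs c = true
    · rw [if_pos hw, ih seen (fun hm => h (List.mem_cons_of_mem _ hm))]
      simp [pvAllWs, hw]
    · rw [if_neg hw, pvM2_split rest r seen (fun hm => h (List.mem_cons_of_mem _ hm))]
      simp [pvAllWs, (by simpa using hw : pvWs c = false)]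

lemma pvM1_end (r : List Char) : ∀ (seen : Bool), '\n' ∉ r → pvM 1 seen r = pvAllWs r := by
  induction r with
  | nil => intro _ _; rfl
  | cons c r ih =>
    intro seen h
    rw [pvM1_cons, if_neg (fun h0 => h (by simp [h0]))]
    by_cases hw : pvWs c = true
    · rw [if_pos hw, ih seen (fun hm => h (List.mem_cons_of_mem _ hm))]
      simp [pvAllWs, hw]
    · rw [if_neg hw, pvM2_end r seen (fun hm => h (List.mem_cons_of_mem _ hm))]
      simp [pvAllWs, (by simpa using hw : pvWs c = false)]

lemma pvM0_split (rest : List Char) (line : List Char) : ∀ (seen : Bool), '\n' ∉ line →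
    pvM 0 seen (line ++ '\n' :: rest) = (pvFindBad seen line || pvM 0 false rest) := by
  induction line with
  | nil =>
    intro seen _
    rw [List.nil_append, pvM0_cons, if_pos rfl]
    simp [pvFindBad]
  | cons c l ih =>
    intro seen h
    have hcne : ¬ c = '\n' := fun h0 => h (by simp [h0])
    have hln : '\n' ∉ l := fun hm => h (List.mem_cons_of_mem _ hm)
    rw [List.cons_append, pvM0_cons, if_neg hcne, pvOcc3_boundary c l rest]
    by_cases hso : (seen && pvOcc3 (c :: l)) = true
    · rw [if_pos hso]
      have hocc : pvOcc3 (c :: l) = true :=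
        (by simpa using hso : seen = true ∧ pvOcc3 (c :: l) = true).2
      obtain ⟨l2, hc, hl⟩ := pvOcc3_shape c l hocc
      subst hc hl
      have hl2 : '\n' ∉ l2 := fun hm => hln (by simp [hm])
      show pvM 4 seen ((' ' :: l2) ++ '\n' :: rest) = _
      show pvM 1 seen (l2 ++ '\n' :: rest) = _
      rw [pvM1_split rest l2 seen hl2]
      rw [pvFindBad, if_pos hso]
      rfl
    · have hso' : (seen && pvOcc3 (c :: l)) = false := by simpa using hso
      rw [hso']
      simp only [Bool.false_eq_true, if_false]
      rw [ih (seen || !pvWs c) hln, pvFindBad, hso']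
      simp only [Bool.false_eq_true, if_false]

lemma pvM0_end (line : List Char) : ∀ (seen : Bool), '\n' ∉ line →
    pvM 0 seen line = pvFindBad seen line := by
  induction line with
  | nil => intro _ _; rfl
  | cons c l ih =>
    intro seen h
    have hcne : ¬ c = '\n' := fun h0 => h (by simp [h0])
    have hln : '\n' ∉ l := fun hm => h (List.mem_cons_of_mem _ hm)
    rw [pvM0_cons, if_neg hcne]
    by_cases hso : (seen && pvOcc3 (c :: l)) = true
    · rw [if_pos hso]
      have hocc : pvOcc3 (c :: l) = true :=
        (by simpa using hso : seen = true ∧ pvOcc3 (c :: l) = true).2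
      obtain ⟨l2, hc, hl⟩ := pvOcc3_shape c l hocc
      subst hc hl
      have hl2 : '\n' ∉ l2 := fun hm => hln (by simp [hm])
      show pvM 1 seen l2 = _
      rw [pvM1_end l2 seen hl2, pvFindBad, if_pos hso]
      rfl
    · have hso' : (seen && pvOcc3 (c :: l)) = false := by simpa using hso
      rw [hso']
      simp only [Bool.false_eq_true, if_false]
      rw [ih (seen || !pvWs c) hln, pvFindBad, hso']
      simp only [Bool.false_eq_true, if_false]

lemma pvM_any (n : Nat) : ∀ (L : List Char), L.length ≤ n →
    pvM 0 false L = (pvSplitNL L).any (fun l => pvFindBad false l) := by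
  induction n with
  | zero =>
    intro L h
    cases L with
    | nil => decide
    | cons c r => simp at h
  | succ n ih =>
    intro L hlen
    by_cases hnl : '\n' ∈ L
    · have hne : L.dropWhile (fun c => !(c == '\n')) ≠ [] := by
        intro h0
        rw [List.dropWhile_eq_nil_iff] at h0
        have := h0 _ hnl
        simp at this
      have hhead : (L.dropWhile (fun c => !(c == '\n'))).head hne = '\n' := by
        have := List.head_dropWhile_not (fun c => !(c == '\n')) hne
        simpa using this
      obtain ⟨a, l2, he⟩ := List.exists_cons_of_ne_nil hne
      have hl2eq : L.dropWhile (fun c => !(c == '\n')) = '\n' :: l2 := by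
        simp only [he] at hhead ⊢
        rw [List.head_cons] at hhead
        rw [hhead]
      have hnn1 : '\n' ∉ L.takeWhile (fun c => !(c == '\n')) := by
        intro hm
        have := List.mem_takeWhile_imp hm
        simp at this
      have hlkey : L = L.takeWhile (fun c => !(c == '\n')) ++ '\n' :: l2 := by
        rw [← hl2eq, List.takeWhile_append_dropWhile]
      have hlen2 : l2.length ≤ n := by
        have h5 := congrArg List.length hlkey
        rw [List.length_append, List.length_cons] at h5
        omega
      rw [hlkey, pvM0_split l2 _ false hnn1, pvSplitNL_cons_nl _ l2 hnn1, List.any_cons,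
        ih l2 hlen2]
    · rw [pvM0_end L false hnl, pvSplitNL_single L hnl]
      simp

lemma pvLineBad_scan (ln : List Char) (h : pvLineBad ln = true) : pvFindBad false ln = true := by
  rw [pvLineBad, Bool.and_eq_true, Bool.not_eq_true'] at h
  obtain ⟨hB, hA⟩ := h
  rw [pvSep_def] at hB hA
  set u := ln.dropWhile PySem.Chars.isspace with hu
  set wpre := ln.takeWhile PySem.Chars.isspace with hwpre
  have hline : ln = wpre ++ u := (List.takeWhile_append_dropWhile).symm
  have hwpre_ws : ∀ c ∈ wpre, PySem.Chars.isspace c = true := fun c hc => List.mem_takeWhile_imp hc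
  have hstrip : PySem.Chars.strip ln = PySem.Chars.rstrip u := by
    rw [PySem.Chars.strip, PySem.Chars.lstrip]
  set t := PySem.Chars.rstrip u with htdef
  set w := (u.reverse.takeWhile PySem.Chars.isspace).reverse with hwdef
  have hut : u = t ++ w := by
    rw [htdef, hwdef, PySem.Chars.rstrip, ← List.reverse_append,
      List.takeWhile_append_dropWhile, List.reverse_reverse]
  have hw_ws : ∀ c ∈ w, PySem.Chars.isspace c = true := by
    intro c hc
    rw [hwdef, List.mem_reverse] at hc
    exact List.mem_takeWhile_imp hc
  rw [hstrip] at hA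
  have hdropline : ∀ p, ln.drop (wpre.length + p) = u.drop p := by
    intro p
    rw [hline, List.drop_append]
    simp
  cases hf : pvFirst (u.drop 1) with
  | none =>
    exfalso
    obtain ⟨j, hj⟩ := (PySem.Chars.exists_prefix_drop_iff_isIn pvSep (u.drop 1)).mpr hB
    have hn := pvFirst_none _ hf j
    have hj2 := (pvCond_iff _).mpr hj
    rw [hn] at hj2
    exact Bool.false_ne_true hj2
  | some k =>
    obtain ⟨hk0, hmin⟩ := pvFirst_some _ k hf
    have hk : pvSep <+: u.drop (1 + k) := by
      have h0 : pvSep <+: (u.drop 1).drop k := (pvCond_iff _).mp hk0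
      rwa [List.drop_drop] at h0
    have hkl : pvSep <+: ln.drop (wpre.length + (1 + k)) := by rw [hdropline]; exact hk
    have hune : u ≠ [] := by
      intro h0
      rw [h0] at hk
      simp only [List.drop_nil] at hk
      exact absurd (List.prefix_nil.mp hk) (by decide)
    have hhead_nws : PySem.Chars.isspace (u.head hune) = false := List.head_dropWhile_not _ hune
    have hheadget : ln[wpre.length]? = some (u.head hune) := by
      rw [hline, List.getElem?_append_right (le_refl _), Nat.sub_self,
        ← List.head?_eq_getElem?]
      exact List.head?_eq_some_head hune
    have hi3 : wpre.length + (1 + k) + 3 ≤ ln.length := by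
      have h5 := hkl.length_le
      rw [show pvSep.length = 3 from by decide, List.length_drop] at h5
      omega
    apply pvScanBad ln false (wpre.length + (1 + k)) hkl
    · right
      have hltl : wpre.length < ln.length := by omega
      have hgel : ln[wpre.length]'hltl = u.head hune := by
        rw [List.getElem?_eq_getElem hltl] at hheadget
        exact Option.some.inj hheadget
      by_contra hcon
      rw [Bool.not_eq_false, pvAllWs_all, List.all_eq_true] at hcon
      have hjt : wpre.length < (ln.take (wpre.length + (1 + k))).length := by
        rw [List.length_take]
        omega
      have hmem : ln[wpre.length]'hltl ∈ ln.take (wpre.length + (1 + k)) := by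
        have h5 : (ln.take (wpre.length + (1 + k)))[wpre.length]'hjt = ln[wpre.length]'hltl :=
          List.getElem_take
        rw [← h5]
        exact List.getElem_mem _
      have h6 := hcon _ hmem
      rw [hgel, pvWs_eq] at h6
      exact absurd h6 (by simp [hhead_nws])
    · rw [pvAllWs_all, List.all_eq_true]
      intro x hx
      obtain ⟨p, hp, hxe⟩ := List.mem_iff_getElem.mp hx
      rw [List.getElem_drop] at hxe
      have hmlen : wpre.length + (1 + k) + 3 + p < ln.length := by
        rw [List.length_drop] at hp
        omega
      by_contra hxws
      rw [Bool.not_eq_true, pvWs_eq] at hxws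
      have h7 : ln[wpre.length + (1 + k) + 3 + p]? = some x := by
        rw [List.getElem?_eq_getElem hmlen]
        exact congrArg some hxe
      have hmt : wpre.length + (1 + k) + 3 + p < wpre.length + t.length := by
        by_contra hmt
        rw [Nat.not_lt] at hmt
        have hmw : wpre.length + (1 + k) + 3 + p - (wpre.length + t.length) < w.length := by
          have h8 := hmlen
          rw [hline, hut, List.length_append, List.length_append] at h8
          omega
        have h6 : ln[wpre.length + (1 + k) + 3 + p]? =
            some (w[wpre.length + (1 + k) + 3 + p - (wpre.length + t.length)]'hmw) := by
          rw [hline, hut, ← List.append_assoc,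
            List.getElem?_append_right (by rw [List.length_append]; omega),
            List.length_append, List.getElem?_eq_getElem hmw]
        rw [h7] at h6
        have h9 := Option.some.inj h6
        exact absurd (hw_ws x (h9 ▸ List.getElem_mem hmw)) (by simp [hxws])
      have hq3 : 1 + k + 3 ≤ t.length := by omega
      have hocc_t : pvSep <+: t.drop (1 + k) := by
        rw [hut] at hk
        exact pvOccOut t w _ hq3 hk
      exact absurd ((PySem.Chars.exists_prefix_drop_iff_isIn pvSep t).mp ⟨_, hocc_t⟩) (by simp [hA])
    · intro i' hi' hpf hdisj
      rcases hdisj with hd | hd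
      · exact absurd hd (by simp)
      · rw [pvAllWs_all] at hd
        have hex : ∃ x ∈ ln.take i', ¬ pvWs x = true := by
          by_contra hno
          have hall : (ln.take i').all pvWs = true := List.all_eq_true.mpr (by
            intro x hx
            by_contra hpx
            exact hno ⟨x, hx, hpx⟩)
          simp [hall] at hd
        obtain ⟨x, hxm, hxw⟩ := hex
        have hxw' : pvWs x = false := by simpa using hxw
        obtain ⟨j, hjlen, hje⟩ := List.mem_iff_getElem.mp hxm
        have hji' : j < i' := by rw [List.length_take] at hjlen; omega
        have hjln : j < ln.length := by
          rw [List.length_take] at hjlen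
          omega
        have hje' : ln[j]'hjln = x := by rw [← hje, List.getElem_take]
        have hja : wpre.length ≤ j := by
          by_contra hja
          rw [Nat.not_le] at hja
          have h8 : ln[j]? = some (wpre[j]'hja) := by
            rw [hline, List.getElem?_append_left hja, List.getElem?_eq_getElem hja]
          have h9 : ln[j]? = some x := by
            rw [List.getElem?_eq_getElem hjln]
            exact congrArg some hje'
          rw [h9] at h8
          have h10 := Option.some.inj h8
          have h11 := hwpre_ws _ (h10 ▸ List.getElem_mem hja)
          rw [← pvWs_eq] at h11
          simp [hxw'] at h11
        have hoccu : pvSep <+: u.drop (i' - wpre.length) := by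
          rw [← hdropline (i' - wpre.length),
            show wpre.length + (i' - wpre.length) = i' from by omega]
          exact hpf
        have hlt : i' - wpre.length - 1 < k := by omega
        have h10 : pvCond ((u.drop 1).drop (i' - wpre.length - 1)) = true := by
          rw [pvCond_iff, List.drop_drop,
            show 1 + (i' - wpre.length - 1) = i' - wpre.length from by omega]
          exact hoccu
        rw [hmin _ hlt] at h10
        exact Bool.false_ne_true h10

lemma pvSep_prefix_iff (N : List Char) :
    pvSep <+: N ↔ N[0]? = some ' ' ∧ N[1]? = some ':' ∧ N[2]? = some ' ' := by
  match N with
  | [] => simp [pvSep]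
  | [a] => simp [pvSep, List.cons_prefix_cons]
  | [a, b] => simp [pvSep, List.cons_prefix_cons]
  | a :: b :: c :: r => simp [pvSep, List.cons_prefix_cons, eq_comm]

-- scan completeness: a successful scan exhibits the first qualifying occurrence
lemma pvScanInv : ∀ (L : List Char) (seen : Bool), pvFindBad seen L = true →
    ∃ i, pvSep <+: L.drop i ∧
      (seen = true ∨ ∃ j, j < i ∧ pvWs (L.getD j ' ') = false) ∧
      pvAllWs (L.drop (i + 3)) = true ∧
      (∀ i' < i, pvSep <+: L.drop i' →
        (seen = true ∨ ∃ j, j < i' ∧ pvWs (L.getD j ' ') = false) → False) := by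
  intro L
  induction L with
  | nil => intro seen h; simp [pvFindBad] at h
  | cons c r ih =>
    intro seen h
    rw [pvFindBad] at h
    by_cases hso : (seen && pvOcc3 (c :: r)) = true
    · rw [if_pos hso] at h
      obtain ⟨hs, ho⟩ := (by simpa using hso : seen = true ∧ pvOcc3 (c :: r) = true)
      refine ⟨0, ?_, Or.inl hs, ?_, fun i' hi' _ _ => by omega⟩
      · rw [List.drop_zero]
        exact List.isPrefixOf_iff_prefix.mp (by rwa [pvOcc3] at ho)
      · obtain ⟨l2, hc, hl⟩ := pvOcc3_shape c r ho
        subst hc hl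
        exact h
    · have hso' : (seen && pvOcc3 (c :: r)) = false := by simpa using hso
      rw [hso'] at h
      simp only [Bool.false_eq_true, if_false] at h
      obtain ⟨i, h1, h2, h3, h4⟩ := ih (seen || !pvWs c) h
      refine ⟨i + 1, by simpa using h1, ?_, by
        rw [show i + 1 + 3 = (i + 3) + 1 from by omega, List.drop_succ_cons]
        exact h3, ?_⟩
      · rcases h2 with h2 | h2
        · rcases (by simpa using h2 : seen = true ∨ pvWs c = false) with hx | hx
          · exact Or.inl hx
          · exact Or.inr ⟨0, by omega, by simpa using hx⟩
        · obtain ⟨j, hj, hjw⟩ := h2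
          exact Or.inr ⟨j + 1, by omega, by simpa using hjw⟩
      · intro i' hi' hpf hcond
        cases i' with
        | zero =>
          rw [List.drop_zero] at hpf
          have hocc : pvOcc3 (c :: r) = true := by
            rw [pvOcc3]
            exact List.isPrefixOf_iff_prefix.mpr hpf
          rcases hcond with hs | ⟨j, hj, _⟩
          · exact absurd (by simp [hs, hocc] : (seen && pvOcc3 (c :: r)) = true) (by simp [hso'])
          · omega
        | succ i'' =>
          refine h4 i'' (by omega) (by simpa using hpf) ?_
          rcases hcond with hs | ⟨j, hj, hjw⟩
          · left; simp [hs]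
          · cases j with
            | zero =>
              left
              have : pvWs c = false := by simpa using hjw
              simp [this]
            | succ j' =>
              right
              exact ⟨j', by omega, by simpa using hjw⟩

-- last character of the rstripped part is not whitespace
lemma pvRstrip_last (u : List Char) (c : Char)
    (hc : (PySem.Chars.rstrip u).getLast? = some c) : PySem.Chars.isspace c = false := by
  have hne2 : u.reverse.dropWhile PySem.Chars.isspace ≠ [] := by
    intro h0
    have h1 : (PySem.Chars.rstrip u).getLast? = none := by
      show ((u.reverse.dropWhile PySem.Chars.isspace).reverse).getLast? = none
      rw [h0]
      rfl
    rw [h1] at hc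
    exact absurd hc (by simp)
  have h1 : (PySem.Chars.rstrip u).getLast? =
      (u.reverse.dropWhile PySem.Chars.isspace).head? := by
    show ((u.reverse.dropWhile PySem.Chars.isspace).reverse).getLast? = _
    rw [List.getLast?_reverse]
  rw [h1, List.head?_eq_some_head hne2] at hc
  have h2 := List.head_dropWhile_not PySem.Chars.isspace hne2
  rw [Option.some.inj hc] at h2
  exact h2

-- a successful raw scan means: B's regex matches the line and A's test fails on it
lemma pvFindBad_parts (x : List Char) (h : pvFindBad false x = true) :
    PySem.Chars.isIn pvSep ((x.dropWhile PySem.Chars.isspace).drop 1) = true ∧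
    PySem.Chars.isIn pvSep (PySem.Chars.strip x) = false := by
  obtain ⟨i, hocc, hpre, hall, hmin⟩ := pvScanInv x false h
  obtain ⟨j, hji, hjw⟩ := (by simpa using hpre : ∃ j, j < i ∧ pvWs (x.getD j ' ') = false)
  set u := x.dropWhile PySem.Chars.isspace with hu
  set wpre := x.takeWhile PySem.Chars.isspace with hwpre
  have hline : x = wpre ++ u := (List.takeWhile_append_dropWhile).symm
  have hwpre_ws : ∀ c ∈ wpre, PySem.Chars.isspace c = true := fun c hc => List.mem_takeWhile_imp hc
  have hstrip : PySem.Chars.strip x = PySem.Chars.rstrip u := by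
    rw [PySem.Chars.strip, PySem.Chars.lstrip]
  set t := PySem.Chars.rstrip u with htdef
  set w := (u.reverse.takeWhile PySem.Chars.isspace).reverse with hwdef
  have hut : u = t ++ w := by
    rw [htdef, hwdef, PySem.Chars.rstrip, ← List.reverse_append,
      List.takeWhile_append_dropWhile, List.reverse_reverse]
  have hdropline : ∀ p, x.drop (wpre.length + p) = u.drop p := by
    intro p
    rw [hline, List.drop_append]
    simp
  -- the witness j is a real in-range non-whitespace position, hence j ≥ wpre.length
  have hjlen : j < x.length := by
    by_contra hcn
    rw [Nat.not_lt] at hcn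
    rw [List.getD_eq_default _ _ hcn] at hjw
    exact absurd hjw (by decide)
  have hja : wpre.length ≤ j := by
    by_contra hja
    rw [Nat.not_le] at hja
    have h8 : x[j]? = some (wpre[j]'hja) := by
      rw [hline, List.getElem?_append_left hja, List.getElem?_eq_getElem hja]
    have h9 : x.getD j ' ' = wpre[j]'hja := by
      rw [List.getD_eq_getElem?_getD, h8, Option.getD_some]
    rw [h9, pvWs_eq] at hjw
    exact absurd (hwpre_ws _ (List.getElem_mem hja)) (by simp [hjw])
  have hune : u ≠ [] := by
    intro h0
    have h0' : x.dropWhile PySem.Chars.isspace = [] := h0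
    rw [List.dropWhile_eq_nil_iff] at h0'
    have hxj : x.getD j ' ' = x[j]'hjlen := by
      rw [List.getD_eq_getElem?_getD, List.getElem?_eq_getElem hjlen]
      rfl
    rw [hxj, pvWs_eq] at hjw
    exact absurd (h0' _ (List.getElem_mem hjlen)) (by simp [hjw])
  have hheadget : x[wpre.length]? = some (u.head hune) := by
    rw [hline, List.getElem?_append_right (le_refl _), Nat.sub_self,
      ← List.head?_eq_getElem?]
    exact List.head?_eq_some_head hune
  have hhead_nws : PySem.Chars.isspace (u.head hune) = false := List.head_dropWhile_not _ hune
  have hioff : wpre.length + (i - wpre.length) = i := by omega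
  have hoccu : pvSep <+: u.drop (i - wpre.length) := by
    rw [← hdropline, hioff]
    exact hocc
  have hB : PySem.Chars.isIn pvSep (u.drop 1) = true := by
    refine (PySem.Chars.exists_prefix_drop_iff_isIn pvSep (u.drop 1)).mp
      ⟨i - wpre.length - 1, ?_⟩
    rw [List.drop_drop, show 1 + (i - wpre.length - 1) = i - wpre.length from by omega]
    exact hoccu
  refine ⟨hB, ?_⟩
  by_contra hAcon
  rw [Bool.not_eq_false, hstrip] at hAcon
  obtain ⟨m, hm⟩ := (PySem.Chars.exists_prefix_drop_iff_isIn pvSep t).mpr hAcon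
  have hm3 : m + 3 ≤ t.length := by
    have h5 := hm.length_le
    rw [show pvSep.length = 3 from by decide, List.length_drop] at h5
    omega
  have htne : t ≠ [] := by
    intro h0
    rw [h0] at hm3
    simp at hm3
  have htlast := List.getLast?_eq_some_getLast htne
  have hlast : PySem.Chars.isspace (t.getLast htne) = false := pvRstrip_last u _ htlast
  have hthead : t.head? = some (u.head hune) := by
    have h5 : u.head? = t.head? := by
      rw [hut, List.head?_append_of_ne_nil _ htne]
    rw [← h5]
    exact List.head?_eq_some_head hune
  have hm1 : 1 ≤ m := by
    by_contra hm0
    rw [Nat.not_le] at hm0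
    interval_cases m
    have hth : t.head? = some ' ' := by
      obtain ⟨rr, hrr⟩ := hm
      rw [List.drop_zero] at hrr
      rw [← hrr]
      rfl
    rw [hthead] at hth
    rw [Option.some.inj hth] at hhead_nws
    exact absurd hhead_nws (by decide)
  have hoccx : pvSep <+: x.drop (wpre.length + m) := by
    rw [hdropline, hut]
    exact pvOccIn t w m hm
  have hMge : i ≤ wpre.length + m := by
    by_contra hMlt
    rw [Nat.not_le] at hMlt
    refine hmin (wpre.length + m) hMlt hoccx (Or.inr ?_)
    exact ⟨wpre.length, by omega, by
      rw [List.getD_eq_getElem?_getD, hheadget, Option.getD_some, pvWs_eq]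
      exact hhead_nws⟩
  have ht1 : 1 ≤ t.length := by omega
  have hlastx : x[wpre.length + (t.length - 1)]? = some (t.getLast htne) := by
    rw [hline, hut, ← List.append_assoc]
    rw [List.getElem?_append_left (by rw [List.length_append]; omega)]
    rw [List.getElem?_append_right (by omega)]
    rw [show wpre.length + (t.length - 1) - wpre.length = t.length - 1 from by omega]
    rw [List.getElem?_eq_getElem (by omega)]
    rw [List.getLast_eq_getElem]
  by_cases hbig : i + 3 ≤ wpre.length + (t.length - 1)
  · -- t's last (non-whitespace) char lies in the all-whitespace tail: contradiction
    have hmem : t.getLast htne ∈ x.drop (i + 3) := by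
      have h5 : (x.drop (i + 3))[wpre.length + (t.length - 1) - (i + 3)]? =
          some (t.getLast htne) := by
        rw [List.getElem?_drop, show i + 3 + (wpre.length + (t.length - 1) - (i + 3)) =
          wpre.length + (t.length - 1) from by omega]
        exact hlastx
      obtain ⟨hl5, hv5⟩ := List.getElem?_eq_some_iff.mp h5
      rw [← hv5]
      exact List.getElem_mem hl5
    rw [pvAllWs_all, List.all_eq_true] at hall
    have h6 := hall _ hmem
    rw [pvWs_eq] at h6
    exact absurd h6 (by simp [hlast])
  · -- then the occurrence is flush with t's end: its ' ' would be t's last char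
    rw [Nat.not_le] at hbig
    have hsp : x[wpre.length + m + 2]? = some ' ' := by
      obtain ⟨_, _, h2⟩ := (pvSep_prefix_iff _).mp hoccx
      rw [List.getElem?_drop] at h2
      exact h2
    have hlast2 : x[wpre.length + (t.length - 1)]? = some ' ' := by
      rw [show wpre.length + (t.length - 1) = wpre.length + m + 2 from by omega]
      exact hsp
    rw [hlastx] at hlast2
    rw [Option.some.inj hlast2] at hlast
    exact absurd hlast (by decide)

lemma pvPa_ofList (x : List Char) :
    pvPa (String.ofList x) = PySem.Chars.isIn pvSep (PySem.Chars.strip x) := by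
  rw [pvPa, PySem.Str.strip, PySem.Str.isIn]
  simp only [String.toList_ofList]
  rfl

-- if A's test succeeds on a line, B's regex matches it
lemma pvMatched_of_A (x : List Char)
    (h : PySem.Chars.isIn pvSep (PySem.Chars.strip x) = true) :
    (pvMatchLine x).isSome = true := by
  cases hu : x.dropWhile PySem.Chars.isspace with
  | nil =>
    exfalso
    have hst : PySem.Chars.strip x = [] := by
      rw [PySem.Chars.strip, PySem.Chars.lstrip, hu]
      rfl
    rw [hst] at h
    exact absurd h (by decide)
  | cons c v =>
    have hne : x.dropWhile PySem.Chars.isspace ≠ [] := by rw [hu]; simp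
    have hc : PySem.Chars.isspace c = false := by
      have h4 : (x.dropWhile PySem.Chars.isspace).head? = some c := by rw [hu]; rfl
      have h5 := List.head?_eq_some_head hne
      rw [h4] at h5
      rw [Option.some.inj h5]
      exact List.head_dropWhile_not _ hne
    set t := PySem.Chars.rstrip (c :: v) with ht
    set w := ((c :: v).reverse.takeWhile PySem.Chars.isspace).reverse with hwdef
    have huw : c :: v = t ++ w := by
      have h1 : t ++ w = c :: v := by
        rw [ht, hwdef, PySem.Chars.rstrip, ← List.reverse_append,
          List.takeWhile_append_dropWhile, List.reverse_reverse]
      exact h1.symm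
    have hstrip : PySem.Chars.strip x = t := by
      rw [PySem.Chars.strip, PySem.Chars.lstrip, hu, ht]
    rw [hstrip] at h
    obtain ⟨m, hm⟩ := (PySem.Chars.exists_prefix_drop_iff_isIn pvSep t).mpr h
    have hm3 : m + 3 ≤ t.length := by
      have h5 := hm.length_le
      rw [show pvSep.length = 3 from by decide, List.length_drop] at h5
      omega
    have htne : t ≠ [] := by
      intro h0
      rw [h0] at hm3
      simp at hm3
    have hthead : t.head? = some c := by
      have := congrArg List.head? huw
      rw [List.head?_append_of_ne_nil _ htne] at this
      exact this.symm
    have hm1 : 1 ≤ m := by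
      by_contra hm0
      rw [Nat.not_le] at hm0
      interval_cases m
      have hth : t.head? = some ' ' := by
        obtain ⟨rr, hrr⟩ := hm
        rw [List.drop_zero] at hrr
        rw [← hrr]
        rfl
      rw [hthead] at hth
      rw [Option.some.inj hth] at hc
      exact absurd hc (by decide)
    have hml : pvMatchLine x = pvScan [c] v := by rw [pvMatchLine, hu]
    rw [hml, pvScan_eq]
    cases hf : pvFirst v with
    | some k => simp
    | none =>
      exfalso
      have hocc : pvSep <+: v.drop (m - 1) := by
        have h5 : pvSep <+: (c :: v).drop m := by
          rw [huw]
          exact pvOccIn t w m hm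
        rw [show m = (m - 1) + 1 from by omega, List.drop_succ_cons] at h5
        exact h5
      have h6 := pvFirst_none v hf (m - 1)
      rw [(pvCond_iff _).mpr hocc] at h6
      exact absurd h6 (by decide)

-- pointwise: every line A keeps, B keeps; so B's list is at least as long
lemma pvLenLe (ls : List (List Char)) :
    (List.filter pvPa (ls.map String.ofList)).length ≤ (ls.filterMap pvMatchLine).length := by
  induction ls with
  | nil => simp
  | cons y ys ih =>
    rw [List.map_cons, List.filter_cons, List.filterMap_cons]
    by_cases hp : pvPa (String.ofList y) = true
    · have hsome : (pvMatchLine y).isSome = true := by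
        apply pvMatched_of_A
        rw [← pvPa_ofList]
        exact hp
      obtain ⟨g, hg⟩ := Option.isSome_iff_exists.mp hsome
      rw [hg, hp]
      simpa using ih
    · rw [if_neg (by simpa using hp)]
      cases pvMatchLine y with
      | none => exact ih
      | some g => exact Nat.le_trans ih (by simp)

-- and a line in the change region is kept by B but dropped by A: strictly longer
lemma pvLenLt (ls : List (List Char)) (hex : ∃ x ∈ ls, pvFindBad false x = true) :
    (List.filter pvPa (ls.map String.ofList)).length < (ls.filterMap pvMatchLine).length := by
  induction ls with
  | nil => simp at hex
  | cons y ys ih =>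
    rw [List.map_cons, List.filter_cons, List.filterMap_cons]
    rcases hex with ⟨x, hx, hbad⟩
    rcases List.mem_cons.mp hx with rfl | hx'
    · obtain ⟨hB, hA⟩ := pvFindBad_parts x hbad
      have hp : pvPa (String.ofList x) = false := by rw [pvPa_ofList, hA]
      have hsome : (pvMatchLine x).isSome = true := by
        cases hux : x.dropWhile PySem.Chars.isspace with
        | nil =>
          rw [hux] at hB
          exact absurd hB (by decide)
        | cons c v =>
          have hml : pvMatchLine x = pvScan [c] v := by rw [pvMatchLine, hux]
          rw [hml, pvScan_eq]
          cases hf : pvFirst v with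
          | some k => simp
          | none =>
            exfalso
            rw [hux, List.drop_succ_cons, List.drop_zero] at hB
            obtain ⟨q, hq⟩ := (PySem.Chars.exists_prefix_drop_iff_isIn pvSep v).mpr hB
            have := pvFirst_none v hf q
            rw [(pvCond_iff _).mpr hq] at this
            exact absurd this (by decide)
      obtain ⟨g, hg⟩ := Option.isSome_iff_exists.mp hsome
      rw [hg, if_neg (by simp [hp])]
      exact Nat.lt_succ_of_le (pvLenLe ys)
    · have hlt := ih ⟨x, hx', hbad⟩
      by_cases hp : pvPa (String.ofList y) = true
      · have hsome : (pvMatchLine y).isSome = true := by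
          apply pvMatched_of_A
          rw [← pvPa_ofList]
          exact hp
        obtain ⟨g, hg⟩ := Option.isSome_iff_exists.mp hsome
        rw [hg, hp]
        simpa using hlt
      · rw [if_neg (by simpa using hp)]
        cases pvMatchLine y with
        | none => exact hlt
        | some g => exact Nat.lt_trans hlt (by simp)

-- per-line key lemma: outside the D_ condition, the stripped regex capture is
-- exactly A's per-line contribution
set_option maxHeartbeats 1000000 in
lemma pvKey (cs : List Char) (hbad : pvLineBad cs = false) :
    (pvMatchLine cs).map PySem.Chars.strip =
      (if PySem.Chars.isIn pvSep (PySem.Chars.strip cs)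
       then some (PySem.Chars.strip ((PySem.Chars.splitOn (PySem.Chars.strip cs) pvSep).headD []))
       else none) := by
  cases hu : cs.dropWhile PySem.Chars.isspace with
  | nil =>
    have hml : pvMatchLine cs = none := by rw [pvMatchLine, hu]
    have ht : PySem.Chars.strip cs = [] := by
      rw [PySem.Chars.strip, PySem.Chars.lstrip, hu]; rfl
    rw [hml, ht]
    simp [show PySem.Chars.isIn pvSep [] = false from by decide]
  | cons c v =>
    have hml : pvMatchLine cs = pvScan [c] v := by rw [pvMatchLine, hu]
    have hne : cs.dropWhile PySem.Chars.isspace ≠ [] := by rw [hu]; simp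
    have hc : PySem.Chars.isspace c = false := by
      have h4 : (cs.dropWhile PySem.Chars.isspace).head? = some c := by rw [hu]; rfl
      have h5 := List.head?_eq_some_head hne
      rw [h4] at h5
      rw [Option.some.inj h5]
      exact List.head_dropWhile_not _ hne
    set t := PySem.Chars.rstrip (c :: v) with ht
    set w := ((c :: v).reverse.takeWhile PySem.Chars.isspace).reverse with hwdef
    have huw : c :: v = t ++ w := by
      have h1 : t ++ w = c :: v := by
        rw [ht, hwdef, PySem.Chars.rstrip, ← List.reverse_append,
          List.takeWhile_append_dropWhile, List.reverse_reverse]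
      exact h1.symm
    have hw : ∀ x ∈ w, PySem.Chars.isspace x = true := by
      intro x hx
      rw [hwdef, List.mem_reverse] at hx
      exact List.mem_takeWhile_imp hx
    have htne : t ≠ [] := by
      intro h0
      rw [h0, List.nil_append] at huw
      exact absurd (hw c (by rw [← huw]; exact List.mem_cons_self)) (by simp [hc])
    have hthead : t.head? = some c := by
      have := congrArg List.head? huw
      rw [List.head?_append_of_ne_nil _ htne] at this
      exact this.symm
    have hstrip : PySem.Chars.strip cs = t := by
      rw [PySem.Chars.strip, PySem.Chars.lstrip, hu, ht]
    -- no occurrence of pvSep at position 0 of t (t starts with the non-space c)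
    have h0occ : ¬ pvSep <+: t := by
      intro hp
      obtain ⟨r, hr⟩ := hp
      have : t.head? = some ' ' := by rw [← hr]; rfl
      rw [hthead] at this
      rw [Option.some.inj this] at hc
      exact absurd hc (by decide)
    -- occurrence in t at j forces j ≥ 1
    have hocc_pos : ∀ j, pvSep <+: t.drop j → 1 ≤ j := by
      intro j hj
      cases j with
      | zero => exact absurd (by simpa using hj) h0occ
      | succ m => omega
    rw [hml, hstrip, pvScan_eq]
    cases hf : pvFirst v with
    | none =>
      have hnone := pvFirst_none v hf
      have hfalse : PySem.Chars.isIn pvSep t = false := by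
        by_cases h : PySem.Chars.isIn pvSep t = true
        swap
        · simpa using h
        · exfalso
          obtain ⟨j, hj⟩ := (PySem.Chars.exists_prefix_drop_iff_isIn pvSep t).mpr h
          have hj1 := hocc_pos j hj
          have hu2 : pvSep <+: (c :: v).drop j := by
            rw [huw]; exact pvOccIn t w j hj
          obtain ⟨m, rfl⟩ : ∃ m, j = m + 1 := ⟨j - 1, by omega⟩
          rw [List.drop_succ_cons] at hu2
          have := (pvCond_iff (v.drop m)).mpr hu2
          rw [hnone m] at this
          exact Bool.false_ne_true this
      simp [hfalse]
    | some k =>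
      obtain ⟨hk, hmin⟩ := pvFirst_some v k hf
      have hdsc : ∀ (j : Nat), (c :: v).drop (j + 1) = v.drop j := fun j => List.drop_succ_cons
      have hku : pvSep <+: (t ++ w).drop (k + 1) := by
        rw [← huw, hdsc k]
        exact (pvCond_iff _).mp hk
      -- the D_ condition's first conjunct holds on this line, so ¬pvLineBad
      -- forces A's test to succeed
      have hbadv : PySem.Chars.isIn " : ".toList ((cs.dropWhile PySem.Chars.isspace).drop 1) = true := by
        rw [pvSep_def, hu, hdsc 0, List.drop_zero]
        exact (PySem.Chars.exists_prefix_drop_iff_isIn pvSep v).mp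
          ⟨k, by rw [← hdsc k, huw]; exact hku⟩
      have hisin : PySem.Chars.isIn pvSep t = true := by
        have hb : pvLineBad cs = false := hbad
        rw [pvLineBad, hbadv, Bool.true_and] at hb
        simp only [Bool.not_eq_false'] at hb
        rw [← hstrip, ← pvSep_def]
        exact hb
      -- A's first occurrence forces room for the whole pvSep inside t at k+1
      obtain ⟨m, hm⟩ := (PySem.Chars.exists_prefix_drop_iff_isIn pvSep t).mpr hisin
      have hmu : pvSep <+: (t ++ w).drop m := pvOccIn t w m hm
      have hm1 := hocc_pos m hm
      have hmk : k + 1 ≤ m := by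
        by_contra hcon
        obtain ⟨i, rfl⟩ : ∃ i, m = i + 1 := ⟨m - 1, by omega⟩
        have : pvCond (v.drop i) = true := by
          rw [pvCond_iff, ← hdsc i, huw]
          exact hmu
        rw [hmin i (by omega)] at this
        exact Bool.false_ne_true this
      have hm3 : m + 3 ≤ t.length := by
        have := hm.length_le
        rw [show pvSep.length = 3 from by decide, List.length_drop] at this
        omega
      have hcol := pvOccColon t w hw (k + 1) hku
      have hlenk : k + 1 + 3 ≤ t.length := by
        rcases Nat.lt_or_ge (k + 1 + 3) (t.length + 1) with h | h
        · omega
        · exfalso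
          -- then t.length = k+3, so m + 3 ≤ k + 3 contradicts k + 1 ≤ m
          omega
      have hkt : pvSep <+: t.drop (k + 1) := pvOccOut t w (k + 1) hlenk hku
      have hminT : ∀ i < k + 1, ¬ pvSep <+: t.drop i := by
        intro i hi hp
        have hi1 := hocc_pos i hp
        obtain ⟨n, rfl⟩ : ∃ n, i = n + 1 := ⟨i - 1, by omega⟩
        have : pvCond (v.drop n) = true := by
          rw [pvCond_iff, ← hdsc n, huw]
          exact pvOccIn t w (n + 1) hp
        rw [hmin n (by omega)] at this
        exact Bool.false_ne_true this
      have hhead := pvHeadSplit_of_min pvSep t (k + 1) hkt hminT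
      rw [pvSplitOnHead pvSep t (by decide), hhead]
      have harg : c :: v.take k = t.take (k + 1) := by
        have h1 : (c :: v).take (k + 1) = t.take (k + 1) := by
          rw [huw, List.take_append_of_le_length (by omega)]
        rw [← h1, List.take_succ_cons]
      simp [hisin, harg]

lemma pvHeadD_map (l : List (List Char)) : (l.map String.ofList).headD "" = String.ofList (l.headD []) := by
  cases l <;> rfl

lemma pvFilterMapIf {α β : Type} (p : α → Bool) (f : α → β) (l : List α) :
    l.filterMap (fun x => if p x then some (f x) else none) = (l.filter p).map f := by
  induction l with
  | nil => rfl
  | cons a l ih =>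
    rw [List.filterMap_cons, List.filter_cons]
    by_cases h : p a
    · simp [h, ih]
    · simp [h, ih]

-- pvKey, lifted to A's String-level per-line test/extraction
set_option maxHeartbeats 1000000 in
lemma pvKeyStr (x : List Char) (hbad : pvLineBad x = false) :
    (pvMatchLine x).map (fun g => String.ofList (PySem.Chars.strip g)) =
      if pvPa (String.ofList x) then some (pvFa (String.ofList x)) else none := by
  have h2 := congrArg (Option.map String.ofList) (pvKey x hbad)
  rw [Option.map_map,
    show (String.ofList ∘ PySem.Chars.strip) = (fun g => String.ofList (PySem.Chars.strip g)) from
      rfl] at h2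
  rw [h2]
  have e1 : ∀ y, PySem.Str.strip (String.ofList y) = String.ofList (PySem.Chars.strip y) := by
    intro y
    rw [PySem.Str.strip]
    simp only [String.toList_ofList]
  have hpa : pvPa (String.ofList x) = PySem.Chars.isIn pvSep (PySem.Chars.strip x) := by
    rw [pvPa, e1, PySem.Str.isIn]
    simp only [String.toList_ofList]
    rfl
  have hfa : pvFa (String.ofList x) =
      String.ofList (PySem.Chars.strip ((PySem.Chars.splitOn (PySem.Chars.strip x) pvSep).headD [])) := by
    have hsplit : PySem.Str.split? (String.ofList (PySem.Chars.strip x)) " : " =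
        some ((PySem.Chars.splitOn (PySem.Chars.strip x) pvSep).map String.ofList) := by
      rw [PySem.Str.split?]
      simp only [String.toList_ofList]
      rw [pvSep_def, PySem.Chars.split?, if_neg (by decide : ¬(pvSep.isEmpty = true)), Option.map_some]
    rw [pvFa, e1, hsplit, Option.getD_some, pvHeadD_map, e1]
  rw [hpa, hfa]
  by_cases h : PySem.Chars.isIn pvSep (PySem.Chars.strip x) = true
  · simp only [h, if_true, Option.map_some]
  · have h' : PySem.Chars.isIn pvSep (PySem.Chars.strip x) = false := by simpa using h
    simp only [h', Bool.false_eq_true, if_false, Option.map_none]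

-- ===== VERDICT (by name: the statements are the Claim_ definitions above) =====
set_option maxHeartbeats 1000000 in
theorem parse_documented_parameters_py_spec : Claim_unchanged_parse_documented_parameters_py := by
  intro s _ hD
  have hbadAll : ∀ x ∈ PySem.Chars.splitOn s.toList "\n".toList, pvLineBad x = false := by
    intro x hx
    by_contra hcon
    rw [Bool.not_eq_false] at hcon
    rw [show ("\n".toList : List Char) = ['\n'] from rfl, pvSplitNL_eq] at hx
    apply hD
    show pvM 0 false s.toList = true
    rw [pvM_any s.toList.length s.toList (le_refl _)]
    exact List.any_eq_true.mpr ⟨x, hx, pvLineBad_scan x hcon⟩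
  rw [pvA_eq, List.nil_append]
  unfold parse_documented_parameters_py_alt
  rw [show PySem.Str.split? s "\n" = some ((PySem.Chars.splitOn s.toList "\n".toList).map String.ofList) from by
    rw [PySem.Str.split?, PySem.Chars.split?,
      if_neg (by decide : ¬(("\n".toList).isEmpty = true)), Option.map_some]]
  rw [Option.getD_some, List.filter_map, List.map_map, List.map_filterMap]
  rw [List.filterMap_congr (fun x hx => pvKeyStr x (hbadAll x hx))]
  rw [pvFilterMapIf]
  simp only [Function.comp_def]

theorem parse_documented_parameters_py_changed : Claim_changed_parse_documented_parameters_py := by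
  unfold Claim_changed_parse_documented_parameters_py; decide

theorem parse_documented_parameters_py_tight : Claim_exact_parse_documented_parameters_py := by
  intro s _ hD heq
  have hbad : ∃ x ∈ PySem.Chars.splitOn s.toList "\n".toList, pvFindBad false x = true := by
    have h1 : pvM 0 false s.toList = true := hD
    rw [pvM_any s.toList.length s.toList (le_refl _)] at h1
    obtain ⟨x, hx, hb⟩ := List.any_eq_true.mp h1
    exact ⟨x, by rw [show ("\n".toList : List Char) = ['\n'] from rfl, pvSplitNL_eq]; exact hx,
      by simpa using hb⟩
  have hlen := congrArg List.length heq
  rw [pvA_eq, List.nil_append] at hlen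
  unfold parse_documented_parameters_py_alt at hlen
  rw [show PySem.Str.split? s "\n" = some ((PySem.Chars.splitOn s.toList "\n".toList).map String.ofList) from by
    rw [PySem.Str.split?, PySem.Chars.split?,
      if_neg (by decide : ¬(("\n".toList).isEmpty = true)), Option.map_some]] at hlen
  rw [Option.getD_some, List.length_map, List.length_map] at hlen
  exact absurd hlen (Nat.ne_of_lt (pvLenLt _ hbad))
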